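-- pv_equiv track=rewrite | github.com/lo1ol/ProEncryptor | ProEncryptor/source/encryptor.py | increasing_alternative_horizontal_permutation_for_word
-- ===== SOURCE A (Python) =====
-- def increasing_alternative_horizontal_permutation_for_word(word):
-- 	wordout_ls = [""]*len(word)
-- 	for i in range(len(word)):
-- 		if i%2 == 0:
-- 			wordout_ls[i//2] = word[i]
-- 		if i%2 == 1:
-- 			wordout_ls[-(i//2+1)] = word[i]
-- 	return ''.join(wordout_ls)
-- ===== SOURCE B (Python) =====
-- def increasing_alternative_horizontal_permutation_for_word(word):
-- 	return word[0::2] + word[1::2][::-1]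
-- ===== Notes on version B (the rewrite author's own statement) =====
-- stated objective: simpler
-- what changed: Replaces the pre-sized output array filled one character at a time by index arithmetic (front for even i, negative back index for odd i) with a direct expression: the even-index slice concatenated with the reversed odd-index slice.
import Mathlib
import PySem

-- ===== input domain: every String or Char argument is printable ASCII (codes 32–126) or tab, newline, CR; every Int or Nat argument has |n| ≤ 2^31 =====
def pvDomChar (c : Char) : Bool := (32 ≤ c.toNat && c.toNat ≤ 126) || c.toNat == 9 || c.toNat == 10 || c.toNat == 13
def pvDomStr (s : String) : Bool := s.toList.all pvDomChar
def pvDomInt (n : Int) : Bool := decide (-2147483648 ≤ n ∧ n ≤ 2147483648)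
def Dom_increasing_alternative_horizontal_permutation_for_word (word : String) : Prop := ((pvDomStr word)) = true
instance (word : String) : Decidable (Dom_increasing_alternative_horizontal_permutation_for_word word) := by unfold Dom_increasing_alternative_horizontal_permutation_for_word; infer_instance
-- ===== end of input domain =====

-- B computes the result as the even-index slice followed by the reversed odd-index
-- slice, instead of A's pre-sized array filled one character at a time (objective: simpler).

-- ===== PORT A =====
-- the loop body: 'if i%2==0: out[i//2]=word[i]; if i%2==1: out[-(i//2+1)]=word[i]'
def pvStepA (cs : List Char) (acc : List (List Char)) (i : Int) : List (List Char) :=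
  let acc := if PySem.Int.mod i 2 = 0 then
      PySem.List.pySetD acc (PySem.Int.floordiv i 2) [PySem.List.pyGetD cs i ' '] else acc
  if PySem.Int.mod i 2 = 1 then
      PySem.List.pySetD acc (-(PySem.Int.floordiv i 2 + 1)) [PySem.List.pyGetD cs i ' '] else acc

def increasing_alternative_horizontal_permutation_for_word (word : String) : String :=
  let cs := word.toList
  let wordout_ls : List (List Char) := List.replicate cs.length []
  let wordout_ls :=
    (PySem.List.pyRange 0 (cs.length : Int) 1).foldl (pvStepA cs) wordout_ls
  String.ofList (PySem.Chars.join [] wordout_ls)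

-- ===== PORT B =====
-- 'return word[0::2] + word[1::2][::-1]' (on code points)
def increasing_alternative_horizontal_permutation_for_word_alt (word : String) : String :=
  let cs := word.toList
  let ev := (PySem.List.slice? cs (some 0) none 2).getD []
  let od := (PySem.List.slice? cs (some 1) none 2).getD []
  String.ofList (ev ++ (PySem.List.slice? od none none (-1)).getD [])

-- ===== PRECONDITION & SPEC =====
def Spec_increasing_alternative_horizontal_permutation_for_word (word : String) (out : String) : Prop := out = increasing_alternative_horizontal_permutation_for_word_alt word
instance (word : String) (out : String) : Decidable (Spec_increasing_alternative_horizontal_permutation_for_word word out) := by unfold Spec_increasing_alternative_horizontal_permutation_for_word; infer_instance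

-- ===== CLAIM (what is proved, stated in full; the proofs are below) =====
def Claim_equal_increasing_alternative_horizontal_permutation_for_word : Prop := ∀ (word : String), Dom_increasing_alternative_horizontal_permutation_for_word word → Spec_increasing_alternative_horizontal_permutation_for_word word (increasing_alternative_horizontal_permutation_for_word word)

-- ===== LEMMAS AND PROOFS =====

-- the even-index and odd-index sublists of a list
def pvEvens {α : Type} : List α → List α
  | [] => []
  | [a] => [a]
  | a :: _ :: l => a :: pvEvens l

def pvOdds {α : Type} : List α → List α
  | [] => []
  | [_] => []
  | _ :: b :: l => b :: pvOdds l

theorem pv_evens_spec {α : Type} (xs : List α) :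
    List.filterMap (fun k => xs[2 * k]?) (List.range ((xs.length + 1) / 2)) = pvEvens xs := by
  induction xs using pvEvens.induct with
  | case1 => simp [pvEvens]
  | case2 a => simp [pvEvens]
  | case3 a b l ih =>
    have hm : ((a::b::l : List α).length + 1) / 2 = (l.length + 1)/2 + 1 := by
      simp; omega
    rw [pvEvens, hm, List.range_succ_eq_map, List.filterMap_cons, List.filterMap_map]
    simp only [Nat.mul_zero, List.getElem?_cons_zero]
    rw [← ih]
    congr 1

theorem pv_odds_spec {α : Type} (xs : List α) :
    List.filterMap (fun k => xs[2 * k + 1]?) (List.range (xs.length / 2)) = pvOdds xs := by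
  induction xs using pvOdds.induct with
  | case1 => simp [pvOdds]
  | case2 a => simp [pvOdds]
  | case3 a b l ih =>
    have hm : ((a::b::l : List α).length) / 2 = l.length/2 + 1 := by
      simp; omega
    rw [pvOdds, hm, List.range_succ_eq_map, List.filterMap_cons, List.filterMap_map]
    simp only [Nat.mul_zero, Nat.zero_add, List.getElem?_cons_succ, List.getElem?_cons_zero]
    rw [← ih]
    congr 1

-- word[0::2] is the even-index sublist
theorem pv_slice_evens {α : Type} (xs : List α) :
    PySem.List.slice? xs (some 0) none 2 = some (pvEvens xs) := by
  simp [PySem.List.slice?, PySem.List.sliceIndices]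
  have hc : (if 0 < xs.length then (((xs.length:Int) + 2 - 1) / 2).toNat else 0) = (xs.length + 1)/2 := by
    split <;> omega
  have hf : (fun x : Nat => xs[((2:Int) * (x:Int)).toNat]?) = fun x => xs[2*x]? := by
    funext x; congr 1 <;> omega
  rw [hc, hf]
  exact pv_evens_spec xs

-- word[1::2] is the odd-index sublist
theorem pv_slice_odds {α : Type} (xs : List α) :
    PySem.List.slice? xs (some 1) none 2 = some (pvOdds xs) := by
  match xs with
  | [] => simp [PySem.List.slice?, PySem.List.sliceIndices, pvOdds]
  | a :: t =>
    simp only [PySem.List.slice?, PySem.List.sliceIndices]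
    norm_num
    have hc : (if 0 < t.length then (((t.length:Int) + 2 - 1) / 2).toNat else 0) = (t.length + 1)/2 := by
      split <;> omega
    have hf : (fun x : Nat => (a::t : List α)[((1:Int) + 2 * (x:Int)).toNat]?) = fun x => (a::t : List α)[2*x+1]? := by
      funext x; congr 1 <;> omega
    rw [hc, hf]
    simpa using pv_odds_spec (a::t)

-- Python's negative-index assignment xs[-(k+1)] = v
theorem pv_pySetD_neg {α : Type} (xs : List α) (k : Nat) (v : α) (h : k + 1 ≤ xs.length) :
    PySem.List.pySetD xs (-((k : Int) + 1)) v = xs.set (xs.length - (k + 1)) v := by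
  have h3 : ¬((k:Int) ≤ -1) := by omega
  have h4 : k < xs.length := by omega
  simp [PySem.List.pySetD, PySem.List.pySet?, PySem.List.pyIdx?, h3, h4]

-- the loop body at an even index writes at position i//2
theorem pv_step_even (cs : List Char) (a : Nat) (s : List (List Char)) (ha : a % 2 = 0) :
    pvStepA cs s (a : Int) = PySem.List.pySetD s ((a / 2 : Nat) : Int) [PySem.List.pyGetD cs (a : Int) ' '] := by
  have h1 : ¬(((a:Int)) % 2 = 1) := by omega
  have h2 : (2:Int) ∣ (a:Int) := by omega
  simp [pvStepA, h1, h2]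

-- the loop body at an odd index writes at position -(i//2+1)
theorem pv_step_odd (cs : List Char) (a : Nat) (s : List (List Char)) (ha : a % 2 = 1) :
    pvStepA cs s (a : Int) = PySem.List.pySetD s (-(((a / 2 : Nat) : Int) + 1)) [PySem.List.pyGetD cs (a : Int) ' '] := by
  have h1 : (((a:Int)) % 2 = 1) := by omega
  have h2 : ¬((2:Int) ∣ (a:Int)) := by omega
  simp [pvStepA, h1, h2]

-- main loop invariant: after processing range(a, n) (a even) starting from
-- P ++ [""]*(n-a) ++ Q with |P| = |Q| = a/2 and d = cs.drop a the remaining input,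
-- the state is P ++ evens(d) ++ reverse(odds(d)) ++ Q.
theorem pv_loop (cs : List Char) (d : List Char) : ∀ (a : Nat) (P Q : List (List Char)),
    cs.drop a = d → a % 2 = 0 → a ≤ cs.length →
    P.length = a / 2 → Q.length = a / 2 →
    (PySem.List.pyRange (a : Int) (cs.length : Int) 1).foldl (pvStepA cs)
        (P ++ List.replicate (cs.length - a) [] ++ Q)
      = P ++ (pvEvens d).map (fun c => [c]) ++ ((pvOdds d).map (fun c => [c])).reverse ++ Q := by
  induction d using pvEvens.induct with
  | case1 =>
    intro a P Q hd he hle hP hQ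
    have ha : a = cs.length := by
      have := List.drop_eq_nil_iff.mp hd
      omega
    rw [PySem.List.pyRange_one_eq_nil (by omega)]
    simp [ha, pvEvens, pvOdds]
  | case2 c =>
    intro a P Q hd he hle hP hQ
    have hlen : cs.length = a + 1 := by
      have := congrArg List.length hd
      simp at this
      omega
    have hget : PySem.List.pyGetD cs (a : Int) ' ' = c := by
      rw [PySem.List.pyGetD_natCast]
      have : cs[a]? = some c := by
        have h0 : (cs.drop a)[0]? = some c := by rw [hd]; rfl
        rwa [List.getElem?_drop, Nat.add_zero] at h0
      simp [List.getD, this]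
    have hrange : PySem.List.pyRange (a : Int) (cs.length : Int) 1 = [(a : Int)] := by
      rw [PySem.List.pyRange_one_cons (by omega), PySem.List.pyRange_one_eq_nil (by omega)]
    rw [hrange]
    simp only [List.foldl_cons, List.foldl_nil]
    rw [pv_step_even cs a _ he, PySem.List.pySetD_natCast, hget]
    have hmid : cs.length - a = 1 := by omega
    rw [hmid, List.set_append]
    have hc1 : a / 2 < (P ++ List.replicate 1 ([]:List Char)).length := by simp [hP]
    rw [if_pos hc1, List.set_append, hP, if_neg (lt_irrefl _), Nat.sub_self]
    simp [pvEvens, pvOdds]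
  | case3 c e l ih =>
    intro a P Q hd he hle hP hQ
    have hlen : cs.length = a + 2 + l.length := by
      have := congrArg List.length hd
      simp at this
      omega
    have hgetc : PySem.List.pyGetD cs (a : Int) ' ' = c := by
      rw [PySem.List.pyGetD_natCast]
      have h0 : (cs.drop a)[0]? = some c := by rw [hd]; rfl
      rw [List.getElem?_drop, Nat.add_zero] at h0
      simp [List.getD, h0]
    have hgete : PySem.List.pyGetD cs ((a + 1 : Nat) : Int) ' ' = e := by
      rw [PySem.List.pyGetD_natCast]
      have h0 : (cs.drop a)[1]? = some e := by rw [hd]; rfl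
      rw [List.getElem?_drop] at h0
      simp [List.getD, h0]
    have hrange : PySem.List.pyRange (a : Int) (cs.length : Int) 1
        = (a : Int) :: ((a : Int) + 1) :: PySem.List.pyRange ((a : Int) + 1 + 1) (cs.length : Int) 1 := by
      rw [PySem.List.pyRange_one_cons (by omega), PySem.List.pyRange_one_cons (by omega)]
    rw [hrange]
    simp only [List.foldl_cons]
    -- first step (even index a)
    rw [pv_step_even cs a _ he, PySem.List.pySetD_natCast, hgetc]
    have hmid : cs.length - a = (cs.length - a - 1) + 1 := by omega
    rw [hmid, List.replicate_succ, List.set_append]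
    have hc1 : a / 2 < (P ++ [] :: List.replicate (cs.length - a - 1) ([]:List Char)).length := by
      simp [hP]
    rw [if_pos hc1, List.set_append, hP, if_neg (lt_irrefl _), Nat.sub_self, List.set_cons_zero]
    -- second step (odd index a+1)
    have hcast1 : ((a : Int) + 1) = ((a + 1 : Nat) : Int) := by push_cast; ring
    rw [hcast1, pv_step_odd cs (a+1) _ (by omega), hgete]
    have hdiv : (a + 1) / 2 = a / 2 := by omega
    rw [hdiv]
    have hs1 : (P ++ [c] :: List.replicate (cs.length - a - 1) ([] : List Char) ++ Q)
        = (P ++ [c] :: List.replicate (cs.length - a - 2) ([] : List Char)) ++ ([] :: Q) := by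
      have hmid2 : cs.length - a - 1 = (cs.length - a - 2) + 1 := by omega
      rw [hmid2, List.replicate_succ' ]
      simp [List.append_assoc]
    rw [hs1]
    have hlen1 : ((P ++ [c] :: List.replicate (cs.length - a - 2) ([] : List Char)) ++ ([] :: Q)).length
        = cs.length := by
      simp
      omega
    rw [pv_pySetD_neg _ (a/2) _ (by rw [hlen1]; omega), hlen1]
    have hidx : cs.length - (a/2 + 1) = (P ++ [c] :: List.replicate (cs.length - a - 2) ([] : List Char)).length := by
      simp
      omega
    rw [hidx, List.set_append, if_neg (lt_irrefl _), Nat.sub_self, List.set_cons_zero]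
    -- apply the induction hypothesis at a+2
    have hdrop2 : cs.drop (a + 2) = l := by
      have : cs.drop (a + 2) = (cs.drop a).drop 2 := by rw [List.drop_drop]
      rw [this, hd]
      rfl
    have hih := ih (a + 2) (P ++ [[c]]) ([[e]] ++ Q) hdrop2 (by omega) (by omega)
      (by simp <;> omega) (by simp <;> omega)
    have hcast2 : (((a + 1 : Nat) : Int) + 1) = ((a + 2 : Nat) : Int) := by push_cast; ring
    rw [hcast2]
    have hstate : (P ++ [c] :: List.replicate (cs.length - a - 2) ([] : List Char)) ++ [e] :: Q
        = (P ++ [[c]]) ++ List.replicate (cs.length - (a + 2)) [] ++ ([[e]] ++ Q) := by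
      have : cs.length - a - 2 = cs.length - (a + 2) := by omega
      simp [this, List.append_assoc]
    rw [hstate, hih]
    simp [pvEvens, pvOdds, List.append_assoc]

-- ===== VERDICT (by name: the statement is the Claim_ definition above) =====
theorem increasing_alternative_horizontal_permutation_for_word_spec : Claim_equal_increasing_alternative_horizontal_permutation_for_word := by
  intro word _
  unfold Spec_increasing_alternative_horizontal_permutation_for_word
  unfold increasing_alternative_horizontal_permutation_for_word
  unfold increasing_alternative_horizontal_permutation_for_word_alt
  dsimp only
  have h := pv_loop word.toList word.toList 0 [] [] (by simp) (by simp) (by simp) (by simp) (by simp)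
  simp only [Nat.sub_zero, List.append_nil, List.nil_append, Int.natCast_zero] at h
  rw [h]
  rw [pv_slice_evens, pv_slice_odds, PySem.List.slice?_none_none_neg_one]
  simp only [Option.getD_some]
  rw [← List.map_reverse, ← List.map_append, PySem.Chars.join_nil_singletons]
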